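-- pv_equiv track=rewrite | github.com/stefanh-it/adventofcode22 | 6/p1.py | process_rows
-- ===== SOURCE A (Python) =====
-- def process_rows(lines: list) -> int:
--     score: int = 0
--     for row in lines:
--         for i, _ in enumerate(row, 4):
--             set_4 = set(row[i-4:i])
--             if len(set_4) == 4:
--                 score += i
--                 break
--     return score
-- ===== SOURCE B (Python) =====
-- def process_rows(lines: list) -> int:
--     score = 0
--     for row in lines:
--         counts = {}
--         distinct = 0
--         for i, ch in enumerate(row):
--             c = counts.get(ch, 0)
--             counts[ch] = c + 1
--             if c == 0:
--                 distinct += 1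
--             if i >= 4:
--                 old = row[i - 4]
--                 cnt = counts[old] - 1
--                 counts[old] = cnt
--                 if cnt == 0:
--                     distinct -= 1
--             if distinct == 4:
--                 score += i + 1
--                 break
--     return score
-- ===== Notes on version B (the rewrite author's own statement) =====
-- stated objective: alternative
-- what changed: Replaces A's per-position construction of set(row[i-4:i]) from a slice by a sliding-window frequency dict maintained incrementally (add incoming char, evict row[i-4], track the distinct-key count), adding i+1 at the first position where the distinct count reaches 4.
import Mathlib
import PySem

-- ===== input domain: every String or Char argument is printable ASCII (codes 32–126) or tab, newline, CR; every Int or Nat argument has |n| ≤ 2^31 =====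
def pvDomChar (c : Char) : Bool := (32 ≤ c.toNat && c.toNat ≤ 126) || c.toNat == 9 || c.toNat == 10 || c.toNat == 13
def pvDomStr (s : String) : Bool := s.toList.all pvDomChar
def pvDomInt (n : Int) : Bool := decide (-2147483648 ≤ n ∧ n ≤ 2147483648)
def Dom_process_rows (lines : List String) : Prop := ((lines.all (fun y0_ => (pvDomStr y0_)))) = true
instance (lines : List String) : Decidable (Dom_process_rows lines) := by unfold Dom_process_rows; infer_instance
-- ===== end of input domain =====

-- B replaces A's per-position slice + set(row[i-4:i]) construction by a single pass per row
-- that maintains a sliding-window character-frequency dict and an incremental distinct count.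

-- ===== PORT A =====
-- inner loop of A: 'for i, _ in enumerate(row, 4): set_4 = set(row[i-4:i]); if len(set_4) == 4: score += i; break'
-- returns the row's contribution to score (i at the break, else 0)
def aRow (row : List Char) (pairs : List (Int × Char)) : Int :=
  match pairs with
  | [] => 0
  | (i, _) :: rest =>
    let set_4 := PySem.Set.ofList (PySem.List.slice row (some (i - 4)) (some i))
    if PySem.Set.len set_4 = 4 then i else aRow row rest

def process_rows (lines : List String) : Int :=
  lines.foldl (fun score row => score + aRow row.toList (PySem.List.enumerate row.toList 4)) 0

-- ===== PORT B =====
-- Source B's inner loop: 'for i, ch in enumerate(row): c = counts.get(ch, 0); counts[ch] = c + 1;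
--   if c == 0: distinct += 1;  if i >= 4: old = row[i-4]; cnt = counts[old]-1; counts[old] = cnt;
--   if cnt == 0: distinct -= 1;  if distinct == 4: score += i + 1; break'
-- (row[i-4] is always in range here, so pyGetD's default is never used)
def bLoop (row : List Char) (pairs : List (Int × Char))
    (counts : PySem.Dict Char Int) (distinct : Int) : Int :=
  match pairs with
  | [] => 0
  | (i, ch) :: rest =>
    let c := counts.getD ch 0
    let counts1 := counts.insert ch (c + 1)
    let distinct1 := if c = 0 then distinct + 1 else distinct
    let st :=
      if 4 ≤ i then
        let old := PySem.List.pyGetD row (i - 4) ' '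
        let cnt := counts1.getD old 0 - 1
        (counts1.insert old cnt, if cnt = 0 then distinct1 - 1 else distinct1)
      else (counts1, distinct1)
    if st.2 = 4 then i + 1 else bLoop row rest st.1 st.2

def process_rows_alt (lines : List String) : Int :=
  lines.foldl
    (fun score row =>
      score + bLoop row.toList (PySem.List.enumerate row.toList 0) PySem.Dict.empty 0) 0

-- ===== PRECONDITION & SPEC =====
def Spec_process_rows (lines : List String) (out : Int) : Prop := out = process_rows_alt lines
instance (lines : List String) (out : Int) : Decidable (Spec_process_rows lines out) := by unfold Spec_process_rows; infer_instance

-- ===== CLAIM (what is proved, stated in full; the proofs are below) =====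
def Claim_equal_process_rows : Prop := ∀ (lines : List String), Dom_process_rows lines → Spec_process_rows lines (process_rows lines)

-- ===== LEMMAS AND PROOFS =====

-- common reference point: first end-index e' ≥ e whose 4-char window row[e'-3..e'] has 4 distinct chars, as e'+1; else 0
def specEnd (row : List Char) (e : Nat) : Int :=
  if e < row.length then
    if 3 ≤ e ∧ ((row.drop (e - 3)).take 4).toFinset.card = 4 then (e : Int) + 1
    else specEnd row (e + 1)
  else 0
termination_by row.length - e

lemma specEnd_stop (row : List Char) (e : Nat) (h : row.length ≤ e) : specEnd row e = 0 := by
  unfold specEnd; rw [if_neg (by omega)]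

lemma setLen (w : List Char) : (PySem.Set.ofList w).length = w.toFinset.card := by
  have hnd := PySem.Set.nodup_ofList (xs := w)
  have hfs : (PySem.Set.ofList w).toFinset = w.toFinset := by
    ext x; simp [List.mem_toFinset, PySem.Set.mem_ofList]
  rw [← List.toFinset_card_of_nodup hnd, hfs]

lemma slice_window (row : List Char) (k : Nat) :
    PySem.List.slice row (some (4 + (k : Int) - 4)) (some (4 + (k : Int))) =
      List.take 4 (List.drop k row) := by
  have e1 : 4 + (k : Int) - 4 = ((k : Nat) : Int) := by omega
  have e2 : 4 + (k : Int) = ((k : Nat) : Int) + ((4 : Nat) : Int) := by push_cast; ring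
  rw [e1, e2, PySem.List.slice_natCast_add]

-- A's inner loop equals specEnd (offset: its entry with first component 4+k checks the window ending at k+3)
lemma aRow_spec (row : List Char) (k : Nat) :
    aRow row (PySem.List.enumerate (row.drop k) (4 + (k : Int))) = specEnd row (k + 3) := by
  induction hd : row.drop k generalizing k with
  | nil =>
    have hk : row.length ≤ k := by
      have := congrArg List.length hd; simp at this; omega
    rw [specEnd_stop row (k + 3) (by omega)]
    simp [PySem.List.enumerate, aRow]
  | cons x t ih =>
    have hk : k < row.length := by
      have := congrArg List.length hd; simp at this; omega
    have ht : row.drop (k + 1) = t := by rw [← List.tail_drop, hd]; rfl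
    rw [PySem.List.enumerate_cons]
    have estep : 4 + (k : Int) + 1 = 4 + ((k + 1 : Nat) : Int) := by push_cast; ring
    have hA : aRow row ((4 + (k : Int), x) :: PySem.List.enumerate t (4 + (k : Int) + 1)) =
        if ((row.drop k).take 4).toFinset.card = 4 then 4 + (k : Int)
        else aRow row (PySem.List.enumerate t (4 + (k : Int) + 1)) := by
      show (if PySem.Set.len (PySem.Set.ofList (PySem.List.slice row (some (4 + (k:Int) - 4)) (some (4 + (k:Int))))) = 4 then (4 + (k:Int)) else _) = _
      rw [slice_window]
      have : PySem.Set.len (PySem.Set.ofList ((row.drop k).take 4)) = 4 ↔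
          ((row.drop k).take 4).toFinset.card = 4 := by
        unfold PySem.Set.len; rw [setLen]; omega
      simp only [List.take_drop] at this ⊢
      simp only [this]
    rw [hA]
    by_cases hfull : k + 4 ≤ row.length
    · have hR : specEnd row (k + 3) =
          if (List.take 4 (List.drop k row)).toFinset.card = 4 then 4 + (k : Int)
          else specEnd row (k + 1 + 3) := by
        rw [specEnd, if_pos (show k + 3 < row.length by omega)]
        have e3 : k + 3 - 3 = k := by omega
        have e4 : k + 3 + 1 = k + 1 + 3 := by omega
        rw [e3, e4]
        by_cases hcc : (List.take 4 (List.drop k row)).toFinset.card = 4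
        · rw [if_pos ⟨by omega, hcc⟩, if_pos hcc]; push_cast; ring
        · rw [if_neg (by tauto), if_neg hcc]
      rw [hR]
      split_ifs with h
      · rfl
      · rw [estep, ih (k + 1) ht]
    · have hcard : (List.take 4 (List.drop k row)).toFinset.card ≠ 4 := by
        have h1 : (List.take 4 (List.drop k row)).toFinset.card ≤ (List.take 4 (List.drop k row)).length :=
          List.toFinset_card_le _
        have h2 : (List.take 4 (List.drop k row)).length ≤ row.length - k := by
          simp
        omega
      have hz : specEnd row (k + 3) = specEnd row (k + 1 + 3) := by
        by_cases hk3 : k + 3 < row.length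
        · have hnc : ¬(3 ≤ k + 3 ∧ ((row.drop (k + 3 - 3)).take 4).toFinset.card = 4) := by
            intro hcc
            have e3 : k + 3 - 3 = k := by omega
            rw [e3] at hcc
            exact hcard hcc.2
          rw [specEnd, if_pos hk3, if_neg hnc]
        · rw [specEnd_stop row (k + 3) (by omega), specEnd_stop row (k + 1 + 3) (by omega)]
      rw [if_neg hcard, estep, ih (k + 1) ht, ← hz]

-- the sliding window after consuming the first k characters: the last min(k,4) of them
def Win (row : List Char) (k : Nat) : List Char := (row.drop (k - 4)).take (min k 4)

lemma win_len (row : List Char) (k : Nat) (hk : k ≤ row.length) :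
    (Win row k).length = min k 4 := by
  simp [Win]; omega

lemma win_succ_small (row : List Char) (k : Nat) (hk : k < row.length) (h4 : k < 4) :
    Win row (k + 1) = Win row k ++ [row[k]] := by
  unfold Win
  rw [show k - 4 = 0 from by omega, show k + 1 - 4 = 0 from by omega,
      show min k 4 = k from by omega, show min (k + 1) 4 = k + 1 from by omega]
  simp only [List.drop_zero]
  rw [List.take_add_one, List.getElem?_eq_getElem hk]
  rfl

lemma take_three_append {a : Type} (l : List a) (x : a) (h : l[3]? = some x) :
    l.take 3 ++ [x] = l.take 4 := by
  conv_rhs => rw [show (4 : Nat) = 3 + 1 from rfl, List.take_add_one]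
  rw [h]
  rfl

lemma win_succ_big (row : List Char) (k : Nat) (hk : k < row.length) (h4 : 4 ≤ k) :
    Win row k ++ [row[k]] = row[k - 4]'(by omega) :: Win row (k + 1) := by
  unfold Win
  rw [show min k 4 = 4 from by omega, show min (k + 1) 4 = 4 from by omega,
      show k + 1 - 4 = k - 3 from by omega]
  have hdp : row.drop (k - 4) = row[k - 4]'(by omega) :: row.drop (k - 3) := by
    rw [List.drop_eq_getElem_cons (by omega), show k - 4 + 1 = k - 3 from by omega]
  have h3 : (row.drop (k - 3))[3]? = some row[k] := by
    rw [List.getElem?_drop, show k - 3 + 3 = k from by omega, List.getElem?_eq_getElem hk]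
  rw [hdp, show List.take 4 (row[k - 4]'(by omega) :: row.drop (k - 3)) =
        row[k - 4]'(by omega) :: List.take 3 (row.drop (k - 3)) from rfl,
      List.cons_append, take_three_append _ _ h3]

lemma card_cons (x : Char) (w : List Char) :
    (((x :: w).toFinset.card : Nat) : Int) =
      (w.toFinset.card : Int) + (if x ∈ w then 0 else 1) := by
  rw [List.toFinset_cons]
  by_cases hx : x ∈ w
  · rw [Finset.insert_eq_self.mpr (List.mem_toFinset.mpr hx), if_pos hx]; ring
  · rw [Finset.card_insert_of_notMem (fun h => hx (List.mem_toFinset.mp h)), if_neg hx]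
    push_cast; ring

lemma card_append_one (w : List Char) (x : Char) :
    (((w ++ [x]).toFinset.card : Nat) : Int) =
      (w.toFinset.card : Int) + (if x ∈ w then 0 else 1) := by
  have : (w ++ [x]).toFinset = (x :: w).toFinset := by ext y; simp
  rw [this, card_cons]

lemma count_append_one (w : List Char) (x c : Char) :
    (w ++ [x]).count c = w.count c + (if c = x then 1 else 0) := by
  rw [List.count_append, List.count_cons, List.count_nil]
  by_cases h : c = x
  · simp [h]
  · have hne : ¬(x == c) = true := by simpa using fun hh => h hh.symm
    simp [h, hne]

lemma bLoop_spec (row : List Char) (k : Nat) (counts : PySem.Dict Char Int) (distinct : Int)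
    (hc : ∀ c, counts.getD c 0 = ((Win row k).count c : Int))
    (hd : distinct = ((Win row k).toFinset.card : Int)) :
    bLoop row (PySem.List.enumerate (row.drop k) (k : Int)) counts distinct = specEnd row k := by
  induction hdrop : row.drop k generalizing k counts distinct with
  | nil =>
    have hk : row.length ≤ k := by
      have := congrArg List.length hdrop; simp at this; omega
    rw [specEnd_stop row k hk]
    simp [PySem.List.enumerate, bLoop]
  | cons ch t ih =>
    have hk : k < row.length := by
      have := congrArg List.length hdrop; simp at this; omega
    have ht : row.drop (k + 1) = t := by rw [← List.tail_drop, hdrop]; rfl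
    have hch : ch = row[k] := by
      have h0 := List.drop_eq_getElem_cons (l := row) hk
      rw [hdrop] at h0
      exact (List.cons_eq_cons.mp h0).1
    rw [PySem.List.enumerate_cons]
    -- the intermediate window after adding the incoming char
    have hc1 : ∀ c', (counts.insert ch ((counts.getD ch 0) + 1)).getD c' 0 =
        (((Win row k ++ [ch]).count c' : Nat) : Int) := by
      intro c'
      rw [PySem.Dict.getD_insert, count_append_one]
      split_ifs with he
      · rw [he, hc ch]; push_cast; ring
      · rw [hc c']; push_cast; ring
    have hd1 : (if counts.getD ch 0 = 0 then distinct + 1 else distinct) =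
        (((Win row k ++ [ch]).toFinset.card : Nat) : Int) := by
      rw [card_append_one, ← hd]
      by_cases hm : ch ∈ Win row k
      · have : counts.getD ch 0 ≠ 0 := by
          rw [hc ch]
          have := List.count_pos_iff.mpr hm
          omega
        rw [if_neg this, if_pos hm]; ring
      · have : counts.getD ch 0 = 0 := by
          rw [hc ch, List.count_eq_zero.mpr hm]; rfl
        rw [if_pos this, if_neg hm]
    have estep : (k : Int) + 1 = ((k + 1 : Nat) : Int) := by push_cast; ring
    -- the check that fires iff the current 4-window is 4-distinct
    have hcond : ∀ dd : Int, dd = ((Win row (k + 1)).toFinset.card : Int) →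
        ((dd = 4) ↔ (3 ≤ k ∧ ((row.drop (k - 3)).take 4).toFinset.card = 4)) := by
      intro dd hdd
      subst hdd
      by_cases h3 : 3 ≤ k
      · have : Win row (k + 1) = (row.drop (k - 3)).take 4 := by
          unfold Win
          rw [show k + 1 - 4 = k - 3 from by omega, show min (k + 1) 4 = 4 from by omega]
        rw [this]
        constructor
        · intro h; exact ⟨h3, by exact_mod_cast h⟩
        · intro h; exact_mod_cast h.2
      · have hlen : (Win row (k + 1)).length ≤ 3 := by
          rw [win_len row (k + 1) (by omega)]; omega
        have hle := List.toFinset_card_le (Win row (k + 1))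
        constructor
        · intro h
          exfalso
          have : ((Win row (k + 1)).toFinset.card : Nat) = 4 := by exact_mod_cast h
          omega
        · intro h; exact absurd h.1 h3
    rw [specEnd, if_pos hk]
    by_cases hbig : 4 ≤ k
    · -- evicting branch: the if inside bLoop takes the 4 ≤ i arm
      have hold : PySem.List.pyGetD row ((k : Int) - 4) ' ' = row[k - 4]'(by omega) := by
        have h0 : (0 : Int) ≤ (k : Int) - 4 := by omega
        have h1 : (k : Int) - 4 < (row.length : Int) := by
          have : (k : Int) < (row.length : Int) := by exact_mod_cast hk
          omega
        rw [PySem.List.pyGetD_eq_getElem row ' ' h0 h1]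
        congr 1
        omega
      have hV : Win row k ++ [ch] = row[k - 4]'(by omega) :: Win row (k + 1) := by
        rw [hch]; exact win_succ_big row k hk hbig
      have hcnt : (counts.insert ch ((counts.getD ch 0) + 1)).getD (row[k - 4]'(by omega)) 0 - 1 =
          (((Win row (k + 1)).count (row[k - 4]'(by omega)) : Nat) : Int) := by
        rw [hc1 (row[k - 4]'(by omega)), hV, List.count_cons]
        simp
      have hc2 : ∀ c', ((counts.insert ch ((counts.getD ch 0) + 1)).insert (row[k - 4]'(by omega))
            ((counts.insert ch ((counts.getD ch 0) + 1)).getD (row[k - 4]'(by omega)) 0 - 1)).getD c' 0 =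
          (((Win row (k + 1)).count c' : Nat) : Int) := by
        intro c'
        rw [PySem.Dict.getD_insert]
        split_ifs with he
        · rw [he, hcnt]
        · rw [hc1 c', hV, List.count_cons]
          have : ¬ ((row[k - 4]'(by omega)) == c') = true := by
            simpa using fun h => he h.symm
          simp [this]
      have hd2 : (if (counts.insert ch ((counts.getD ch 0) + 1)).getD (row[k - 4]'(by omega)) 0 - 1 = 0 then
            (if counts.getD ch 0 = 0 then distinct + 1 else distinct) - 1
            else (if counts.getD ch 0 = 0 then distinct + 1 else distinct)) =
          (((Win row (k + 1)).toFinset.card : Nat) : Int) := by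
        rw [hcnt, hd1, hV, card_cons]
        by_cases hm : (row[k - 4]'(by omega)) ∈ Win row (k + 1)
        · have hne : (((Win row (k + 1)).count (row[k - 4]'(by omega)) : Nat) : Int) ≠ 0 := by
            have := List.count_pos_iff.mpr hm; omega
          rw [if_neg hne, if_pos hm]; ring
        · have heq : (((Win row (k + 1)).count (row[k - 4]'(by omega)) : Nat) : Int) = 0 := by
            rw [List.count_eq_zero.mpr hm]; rfl
          rw [if_pos heq, if_neg hm]; ring
      simp only [bLoop]
      rw [if_pos (show (4 : Int) ≤ (k : Int) from by exact_mod_cast hbig)]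
      dsimp only
      rw [hold, hd2]
      rw [if_congr (hcond _ rfl) rfl rfl]
      by_cases hfire : 3 ≤ k ∧ ((row.drop (k - 3)).take 4).toFinset.card = 4
      · rw [if_pos hfire, if_pos hfire]
      · rw [if_neg hfire, if_neg hfire, estep, ih (k + 1) _ _ hc2 rfl ht]
    · -- no eviction: the window simply grows
      have hW : Win row (k + 1) = Win row k ++ [ch] := by
        rw [hch]; exact win_succ_small row k hk (by omega)
      have hc2 : ∀ c', (counts.insert ch ((counts.getD ch 0) + 1)).getD c' 0 =
          (((Win row (k + 1)).count c' : Nat) : Int) := by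
        intro c'; rw [hW]; exact hc1 c'
      have hd2 : (if counts.getD ch 0 = 0 then distinct + 1 else distinct) =
          (((Win row (k + 1)).toFinset.card : Nat) : Int) := by
        rw [hW]; exact hd1
      simp only [bLoop]
      rw [if_neg (show ¬ (4 : Int) ≤ (k : Int) from by
        intro h; exact hbig (by exact_mod_cast h))]
      dsimp only
      rw [hd2]
      rw [if_congr (hcond _ rfl) rfl rfl]
      by_cases hfire : 3 ≤ k ∧ ((row.drop (k - 3)).take 4).toFinset.card = 4
      · rw [if_pos hfire, if_pos hfire]
      · rw [if_neg hfire, if_neg hfire, estep, ih (k + 1) _ _ hc2 rfl ht]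

lemma specEnd_start (row : List Char) : specEnd row 0 = specEnd row 3 := by
  have step : ∀ e, e < 3 → specEnd row e = specEnd row (e + 1) := by
    intro e he
    by_cases h : e < row.length
    · rw [specEnd, if_pos h, if_neg (by intro hc; omega)]
    · rw [specEnd_stop row e (by omega), specEnd_stop row (e + 1) (by omega)]
  rw [step 0 (by norm_num), step 1 (by norm_num), step 2 (by norm_num)]

lemma row_eq (row : List Char) :
    aRow row (PySem.List.enumerate row 4) =
      bLoop row (PySem.List.enumerate row 0) PySem.Dict.empty 0 := by
  have hA := aRow_spec row 0
  have hB := bLoop_spec row 0 PySem.Dict.empty 0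
    (by intro c; simp [Win, PySem.Dict.getD_empty])
    (by simp [Win])
  norm_num at hA hB
  rw [hA, hB, specEnd_start]

-- ===== VERDICT (by name: the statement is the Claim_ definition above) =====
theorem process_rows_spec : Claim_equal_process_rows := by
  intro lines _
  unfold Spec_process_rows process_rows process_rows_alt
  congr 1
  funext score row
  rw [row_eq]
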